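-- pv_equiv track=rewrite | github.com/croweykid/ephemeraldaddy | ephemeraldaddy/gui/features/charts/tagging.py | remove_tag_casefold
-- ===== SOURCE A (Python) =====
-- from typing import Iterable
--
-- def normalize_tag_list(tags: Iterable[str] | None) -> list[str]:
--     if not tags:
--         return []
--     normalized: list[str] = []
--     seen: set[str] = set()
--     for raw_value in tags:
--         tag = str(raw_value or "").strip()
--         if not tag:
--             continue
--         dedupe_key = tag.casefold()
--         if dedupe_key in seen:
--             continue
--         seen.add(dedupe_key)
--         normalized.append(tag)
--     return normalized
--
-- def remove_tag_casefold(tags: Iterable[str] | None, tag_to_remove: str | None) -> list[str]: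
--     normalized_remove_key = str(tag_to_remove or "").strip().casefold()
--     if not normalized_remove_key:
--         return normalize_tag_list(tags)
--     return [
--         tag
--         for tag in normalize_tag_list(tags)
--         if tag.casefold() != normalized_remove_key
--     ]
-- ===== SOURCE B (Python) =====
-- def remove_tag_casefold(tags, tag_to_remove):
--     # Single fused pass: dedup-normalize and removal in one loop, no helper call.
--     remove_key = str(tag_to_remove or "").strip().casefold()
--     if not tags:
--         return []
--     seen = set()
--     result = []
--     for raw in tags:
--         tag = str(raw or "").strip()
--         if not tag:
--             continue
--         key = tag.casefold()
--         if key in seen: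
--             continue
--         seen.add(key)
--         if key != remove_key:
--             result.append(tag)
--     return result
-- ===== Notes on version B (the rewrite author's own statement) =====
-- stated objective: simpler
-- what changed: B fuses A's two passes (normalize_tag_list building a deduped list, then a filtering comprehension) into one loop that strips, dedups and drops the removed key in a single traversal, with no helper function and no separate empty-remove-key branch.
import Mathlib
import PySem

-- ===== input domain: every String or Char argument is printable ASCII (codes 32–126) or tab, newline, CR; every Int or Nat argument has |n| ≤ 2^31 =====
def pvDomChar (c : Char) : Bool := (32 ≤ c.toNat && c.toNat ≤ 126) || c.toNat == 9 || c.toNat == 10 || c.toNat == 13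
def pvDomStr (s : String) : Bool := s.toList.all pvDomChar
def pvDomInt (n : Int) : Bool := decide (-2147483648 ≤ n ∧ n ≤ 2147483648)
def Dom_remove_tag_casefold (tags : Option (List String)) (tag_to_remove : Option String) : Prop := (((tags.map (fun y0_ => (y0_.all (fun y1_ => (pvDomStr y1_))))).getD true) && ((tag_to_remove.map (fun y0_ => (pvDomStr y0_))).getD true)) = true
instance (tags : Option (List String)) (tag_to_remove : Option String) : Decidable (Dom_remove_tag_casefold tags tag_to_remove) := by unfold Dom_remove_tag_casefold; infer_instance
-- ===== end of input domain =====

-- B fuses A's two passes (normalize then filter) into one strip/dedup/remove loop; objective: simpler.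


-- ===== PORT A =====
-- one loop step of normalize_tag_list: state = (normalized, seen); tag = str(raw_value or "").strip(),
-- dedupe_key = tag.casefold() (= lower on the ASCII domain)
def aStep (st : List String × PySem.Set String) (raw_value : String) : List String × PySem.Set String :=
  if PySem.Str.strip (if raw_value == "" then "" else raw_value) == "" then st
  else if PySem.Set.contains st.2 (PySem.Str.lower (PySem.Str.strip (if raw_value == "" then "" else raw_value))) then st
  else (st.1 ++ [PySem.Str.strip (if raw_value == "" then "" else raw_value)],
        PySem.Set.add st.2 (PySem.Str.lower (PySem.Str.strip (if raw_value == "" then "" else raw_value))))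

def normalize_tag_list (tags : Option (List String)) : List String :=
  match tags with
  | none => []                     -- if not tags (None)
  | some l =>
    if l == [] then []             -- if not tags (empty list)
    else (l.foldl aStep ([], PySem.Set.empty)).1

-- str(tag_to_remove or "").strip().casefold()
def aRemoveKey (tag_to_remove : Option String) : String :=
  PySem.Str.lower (PySem.Str.strip (match tag_to_remove with
    | none => ""
    | some s => if s == "" then "" else s))

def remove_tag_casefold (tags : Option (List String)) (tag_to_remove : Option String) : List String :=
  let normalized_remove_key := aRemoveKey tag_to_remove
  if normalized_remove_key == "" then normalize_tag_list tags
  else (normalize_tag_list tags).filter (fun tag => PySem.Str.lower tag != normalized_remove_key)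

-- ===== PORT B =====
-- one loop step of B's fused pass: state = (result, seen); tag = str(raw or "").strip(), key = tag.casefold()
def bStep (remove_key : String) (st : List String × PySem.Set String) (raw : String) : List String × PySem.Set String :=
  if PySem.Str.strip (if raw == "" then "" else raw) == "" then st
  else if PySem.Set.contains st.2 (PySem.Str.lower (PySem.Str.strip (if raw == "" then "" else raw))) then st
  else ((if PySem.Str.lower (PySem.Str.strip (if raw == "" then "" else raw)) != remove_key
         then st.1 ++ [PySem.Str.strip (if raw == "" then "" else raw)] else st.1),
        PySem.Set.add st.2 (PySem.Str.lower (PySem.Str.strip (if raw == "" then "" else raw))))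

-- remove_key = str(tag_to_remove or "").strip().casefold()
def bRemoveKey (tag_to_remove : Option String) : String :=
  PySem.Str.lower (PySem.Str.strip (match tag_to_remove with
    | none => ""
    | some s => if s == "" then "" else s))

def remove_tag_casefold_alt (tags : Option (List String)) (tag_to_remove : Option String) : List String :=
  let remove_key := bRemoveKey tag_to_remove
  match tags with
  | none => []                     -- if not tags (None)
  | some l =>
    if l == [] then []             -- if not tags (empty list)
    else (l.foldl (bStep remove_key) ([], PySem.Set.empty)).1

-- ===== PRECONDITION & SPEC =====
def Spec_remove_tag_casefold (tags : Option (List String)) (tag_to_remove : Option String) (out : List String) : Prop := out = remove_tag_casefold_alt tags tag_to_remove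
instance (tags : Option (List String)) (tag_to_remove : Option String) (out : List String) : Decidable (Spec_remove_tag_casefold tags tag_to_remove out) := by unfold Spec_remove_tag_casefold; infer_instance

-- ===== CLAIM (what is proved, stated in full; the proofs are below) =====
def Claim_equal_remove_tag_casefold : Prop := ∀ (tags : Option (List String)) (tag_to_remove : Option String), Dom_remove_tag_casefold tags tag_to_remove → Spec_remove_tag_casefold tags tag_to_remove (remove_tag_casefold tags tag_to_remove)

-- ===== LEMMAS AND PROOFS =====

-- a nonempty string has a nonempty lowercase
theorem lower_ne_empty {s : String} (h : s ≠ "") : PySem.Str.lower s ≠ "" := by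
  intro hc
  apply h
  have hl := congrArg String.toList hc
  simp only [PySem.Str.toList_lower, PySem.Chars.lower] at hl
  cases hs : s.toList with
  | nil => exact String.ext (by simp [hs])
  | cons a t => rw [hs] at hl; simp at hl

-- B's fold with a filtered accumulator computes the filter of A's fold
theorem fold_filter (rk : String) (l : List String) :
    ∀ (acc : List String) (seen : PySem.Set String),
      (l.foldl (bStep rk) (acc.filter (fun tag => PySem.Str.lower tag != rk), seen)).1
        = ((l.foldl aStep (acc, seen)).1).filter (fun tag => PySem.Str.lower tag != rk) := by
  induction l with
  | nil => intro acc seen; simp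
  | cons raw rest ih =>
    intro acc seen
    simp only [List.foldl_cons, bStep, aStep]
    by_cases h1 : (PySem.Str.strip (if raw == "" then "" else raw) == "") = true
    · rw [if_pos h1, if_pos h1]; exact ih acc seen
    · rw [if_neg h1, if_neg h1]
      by_cases h2 : PySem.Set.contains seen (PySem.Str.lower (PySem.Str.strip (if raw == "" then "" else raw))) = true
      · rw [if_pos h2, if_pos h2]; exact ih acc seen
      · rw [if_neg h2, if_neg h2]
        by_cases h3 : (PySem.Str.lower (PySem.Str.strip (if raw == "" then "" else raw)) != rk) = true
        · rw [if_pos h3]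
          have he : (acc.filter (fun tag => PySem.Str.lower tag != rk)) ++ [PySem.Str.strip (if raw == "" then "" else raw)]
              = (acc ++ [PySem.Str.strip (if raw == "" then "" else raw)]).filter (fun tag => PySem.Str.lower tag != rk) := by
            simp only [List.filter_append, List.filter_cons, h3, if_true, List.filter_nil]
          rw [he]; exact ih _ _
        · rw [if_neg h3]
          have he : (acc.filter (fun tag => PySem.Str.lower tag != rk))
              = (acc ++ [PySem.Str.strip (if raw == "" then "" else raw)]).filter (fun tag => PySem.Str.lower tag != rk) := by
            simp only [List.filter_append, List.filter_cons, List.filter_nil]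
            simp only [Bool.not_eq_true] at h3
            simp only [h3, Bool.false_eq_true, if_false, List.append_nil]
          rw [he]; exact ih _ _

-- every element of A's fold result is nonempty (given a nonempty accumulator)
theorem fold_a_nonempty (l : List String) :
    ∀ (acc : List String) (seen : PySem.Set String),
      (∀ x ∈ acc, x ≠ "") → ∀ x ∈ (l.foldl aStep (acc, seen)).1, x ≠ "" := by
  induction l with
  | nil => intro acc seen hacc; simpa using hacc
  | cons raw rest ih =>
    intro acc seen hacc
    simp only [List.foldl_cons, aStep]
    by_cases h1 : (PySem.Str.strip (if raw == "" then "" else raw) == "") = true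
    · rw [if_pos h1]; exact ih acc seen hacc
    · rw [if_neg h1]
      by_cases h2 : PySem.Set.contains seen (PySem.Str.lower (PySem.Str.strip (if raw == "" then "" else raw))) = true
      · rw [if_pos h2]; exact ih acc seen hacc
      · rw [if_neg h2]
        apply ih
        intro x hx
        rcases List.mem_append.mp hx with hx | hx
        · exact hacc x hx
        · simp only [List.mem_singleton] at hx
          subst hx
          simpa using h1

theorem filter_nonempty_id (xs : List String) (h : ∀ x ∈ xs, x ≠ "") :
    xs.filter (fun tag => PySem.Str.lower tag != "") = xs := by
  apply List.filter_eq_self.mpr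
  intro x hx
  simpa using lower_ne_empty (h x hx)

-- ===== VERDICT (by name: the statement is the Claim_ definition above) =====
theorem remove_tag_casefold_spec : Claim_equal_remove_tag_casefold := by
  unfold Claim_equal_remove_tag_casefold
  intro tags tag_to_remove _
  simp only [Spec_remove_tag_casefold, remove_tag_casefold, remove_tag_casefold_alt,
    normalize_tag_list]
  rw [show bRemoveKey tag_to_remove = aRemoveKey tag_to_remove from rfl]
  generalize aRemoveKey tag_to_remove = rk
  by_cases hempty : (rk == "") = true
  · -- remove key empty: A returns the normalized list; B's guard "key != rk" is always true
    rw [if_pos hempty]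
    cases tags with
    | none => rfl
    | some l =>
      by_cases hl : (l == []) = true
      · simp only [hl, if_true]
      · simp only [hl, Bool.false_eq_true, if_false]
        have hrk' : rk = "" := by simpa using hempty
        subst hrk'
        exact ((fold_filter "" l [] PySem.Set.empty).trans
          (filter_nonempty_id _ (fold_a_nonempty l [] PySem.Set.empty (by simp)))).symm
  · rw [if_neg hempty]
    cases tags with
    | none => rfl
    | some l =>
      by_cases hl : (l == []) = true
      · simp only [hl, if_true, List.filter_nil]
      · simp only [hl, Bool.false_eq_true, if_false]
        exact (fold_filter rk l [] PySem.Set.empty).symm
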